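-- pv_equiv track=rewrite | github.com/Zhiyuan-Jiao/leetcode-notes | 636 Exclusive Time of Function.py | exclusiveTime
-- ===== SOURCE A (Python) =====
-- from typing import List
--
-- def exclusiveTime(n: int, logs: List[str]) -> List[int]:
--     prevTime = 0
--     stack = []
--     res = [0] * n
--     for log in logs:
--         idx, status, time = log.split(":")
--         idx, time = int(idx), int(time)
--
--         if status == "start":
--             if stack:
--                 res[stack[-1]] += time - prevTime
--             prevTime = time
--             stack.append(idx)
--         else:
--             res[stack.pop()] += time - prevTime + 1
--             prevTime = time + 1
--
--     return res
-- ===== SOURCE B (Python) =====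
-- from typing import List
--
-- def exclusiveTime(n: int, logs: List[str]) -> List[int]:
--     # stage 1: parse every log into a typed event (id, is_start, time)
--     events = []
--     for log in logs:
--         idx, status, time = log.split(":")
--         events.append((int(idx), status == "start", int(time)))
--     # stage 2: per-frame accounting; each frame is (id, start time, child time)
--     res = [0] * n
--     frames = []
--     for idx, is_start, time in events:
--         if is_start:
--             frames.append((idx, time, 0))
--         else:
--             i, s, c = frames.pop()
--             dur = time - s + 1
--             res[i] += dur - c
--             if frames:
--                 j, sj, cj = frames[-1]
--                 frames[-1] = (j, sj, cj + dur)
--     return res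
-- ===== Notes on version B (the rewrite author's own statement) =====
-- stated objective: alternative
-- what changed: Replaces A's single pass with a global prevTime running clock (crediting a slice to the current top on every event) by two staged passes: first parse all logs into typed (id, is_start, time) events, then run per-frame accounting on a stack of (id, start_time, child_time) frames where each function's exclusive time is settled once, at its own 'end' event, as duration minus accumulated child time.
-- outside the precondition, e.g. on exclusiveTime(2, ['0:start:0', '1:start:5']): A returns [5, 0], B returns [0, 0]; on exclusiveTime(2, ['-1:start:0', '-1:end:3']): A returns [0, 4], B returns [0, 4]
import Mathlib
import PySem

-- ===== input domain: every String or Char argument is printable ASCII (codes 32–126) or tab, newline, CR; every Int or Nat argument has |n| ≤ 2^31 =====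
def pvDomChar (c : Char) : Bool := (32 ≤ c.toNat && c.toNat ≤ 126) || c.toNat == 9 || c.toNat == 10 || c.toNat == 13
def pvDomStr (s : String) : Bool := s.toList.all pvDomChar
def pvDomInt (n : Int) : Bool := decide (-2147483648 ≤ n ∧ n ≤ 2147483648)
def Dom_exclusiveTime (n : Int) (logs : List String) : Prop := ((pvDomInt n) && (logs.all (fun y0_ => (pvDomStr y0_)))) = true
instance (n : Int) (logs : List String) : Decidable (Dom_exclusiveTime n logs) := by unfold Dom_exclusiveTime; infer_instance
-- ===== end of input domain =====

-- B replaces A's single pass with its global prevTime running clock by two staged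
-- passes: parse all logs into typed (id, is_start, time) events, then per-frame
-- (id, start, child_time) accounting settling each frame once, at its 'end' event:
-- an alternative decomposition of the same task, same cost.

-- ===== PORT A =====
-- 'idx, status, time = log.split(":"); idx, time = int(idx), int(time)'
-- (none exactly where Python raises ValueError)
def parseLog? (log : String) : Option (Int × String × Int) :=
  match PySem.Str.split? log ":" with
  | some [a, b, c] =>
    match PySem.Int.ofStr? a, PySem.Int.ofStr? c with
    | some idx, some t => some (idx, b, t)
    | _, _ => none
  | _ => none

-- 'res[i] += v' (none exactly where Python raises IndexError)
def pyAddAt? (res : List Int) (i v : Int) : Option (List Int) :=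
  (PySem.List.pyGet? res i).bind fun cur => PySem.List.pySet? res i (cur + v)

-- state: (prevTime, stack of ids — top first, res); none = an exception was raised
def stepA (st : Option (Int × List Int × List Int)) (log : String) :
    Option (Int × List Int × List Int) :=
  st.bind fun s =>
    (parseLog? log).bind fun p =>
      let prev := s.1; let stack := s.2.1; let res := s.2.2
      let idx := p.1; let status := p.2.1; let time := p.2.2
      if status == "start" then
        match stack with
        | [] => some (time, idx :: stack, res)
        | top :: _ =>
          (pyAddAt? res top (time - prev)).map (fun res' => (time, idx :: stack, res'))
      else
        match stack with
        | [] => none   -- stack.pop() on an empty list: IndexError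
        | top :: rest =>
          (pyAddAt? res top (time - prev + 1)).map (fun res' => (time + 1, rest, res'))

def exclusiveTime (n : Int) (logs : List String) : List Int :=
  match logs.foldl stepA (some (0, [], List.replicate n.toNat 0)) with
  | some s => s.2.2
  | none => []

-- ===== PORT B =====
-- stage 1: '(int(idx), status == "start", int(time))' for one log
-- (none exactly where Python raises ValueError)
def pvParseB? (log : String) : Option (Int × Bool × Int) :=
  match PySem.Str.split? log ":" with
  | some [f0, f1, f2] =>
    (PySem.Int.ofStr? f0).bind fun i =>
      (PySem.Int.ofStr? f2).map fun t => (i, f1 == "start", t)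
  | _ => none

-- stage 2: walk the events with a stack of (id, start time, child time) frames.
-- The list operations are total: an out-of-range 'res[i] +=' and a pop from an
-- empty frame stack (where Python raises IndexError) are excluded by Pre_ below.
def runB (frames : List (Int × Int × Int)) (res : List Int) :
    List (Int × Bool × Int) → List Int
  | [] => res
  | (i, true, t) :: evs => runB ((i, t, 0) :: frames) res evs
  | (_, false, t) :: evs =>
    match frames with
    | [] => runB [] res evs   -- unreachable under Pre_: Python's frames.pop() raises
    | (i, s, c) :: rest =>
      let dur := t - s + 1
      runB (match rest with
            | [] => []
            | (j, sj, cj) :: r => (j, sj, cj + dur) :: r)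
        (res.set i.toNat (res.getD i.toNat 0 + (dur - c))) evs

def exclusiveTime_alt (n : Int) (logs : List String) : List Int :=
  match logs.mapM pvParseB? with
  | some evs => runB [] (List.replicate n.toNat 0) evs
  | none => []

-- ===== PRECONDITION & SPEC =====
-- log is parseable with its function id inside [0, n)
def logOk (n : Int) (log : String) : Bool :=
  match parseLog? log with
  | some p => decide (0 ≤ p.1 ∧ p.1 < n)
  | none => false

def isStartLog (log : String) : Bool :=
  match parseLog? log with
  | some p => p.2.1 == "start"
  | none => false

-- Pre_ restricts to the problem's natural domain (the LeetCode guarantees): every log is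
-- "id:status:time" with int-parsable fields and 0 ≤ id < n, and the start/end events are
-- balanced (every prefix has at least as many starts as ends, and they are equal overall).
-- It excludes inputs where A raises (malformed logs, an 'end' on an empty stack, an id
-- outside [-n, n)) and the unspecified corners where A still returns: negative ids hitting
-- Python's index wraparound, and unbalanced logs with unclosed 'start' frames, on which A's
-- partial credits to never-closed frames are an accident of its prevTime bookkeeping.
def Pre_exclusiveTime (n : Int) (logs : List String) : Prop :=
  (∀ log ∈ logs, logOk n log = true) ∧
  (∀ k ≤ logs.length,
    (logs.take k).countP (fun l => !isStartLog l) ≤ (logs.take k).countP isStartLog) ∧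
  logs.countP (fun l => !isStartLog l) = logs.countP isStartLog

instance (n : Int) (logs : List String) : Decidable (Pre_exclusiveTime n logs) := by
  unfold Pre_exclusiveTime; infer_instance

def pvWitness_exclusiveTime : Int × List String :=
  (2, ["0:start:0", "1:start:2", "1:end:5", "0:end:6"])

def Spec_exclusiveTime (n : Int) (logs : List String) (out : List Int) : Prop := out = exclusiveTime_alt n logs
instance (n : Int) (logs : List String) (out : List Int) : Decidable (Spec_exclusiveTime n logs out) := by unfold Spec_exclusiveTime; infer_instance

-- ===== CLAIM (what is proved, stated in full; the proofs are below) =====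
def Claim_equal_exclusiveTime : Prop := ∀ (n : Int) (logs : List String), Dom_exclusiveTime n logs → Pre_exclusiveTime n logs → Spec_exclusiveTime n logs (exclusiveTime n logs)

-- ===== LEMMAS AND PROOFS =====

-- B's one parser stated in terms of A's (used to align the two passes)
theorem parseB_eq (log : String) :
    pvParseB? log = (parseLog? log).map (fun p => (p.1, p.2.1 == "start", p.2.2)) := by
  unfold pvParseB? parseLog?
  cases PySem.Str.split? log ":" with
  | none => rfl
  | some l =>
    match l with
    | [] => rfl
    | [_] => rfl
    | [_, _] => rfl
    | _ :: _ :: _ :: _ :: _ => rfl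
    | [a, b, c] =>
      cases h1 : PySem.Int.ofStr? a <;> cases h2 : PySem.Int.ofStr? c <;> simp [h1, h2]

theorem logOk_parse {n : Int} {log : String} (h : logOk n log = true) :
    ∃ idx status time, parseLog? log = some (idx, status, time) ∧ 0 ≤ idx ∧ idx < n := by
  unfold logOk at h
  rcases hp : parseLog? log with _ | ⟨⟨a, b, c⟩⟩
  · rw [hp] at h; simp at h
  · rw [hp] at h; simp at h; exact ⟨a, b, c, rfl, h.1, h.2⟩

theorem mapM_parseB_some (n : Int) :
    ∀ logs : List String, (∀ log ∈ logs, logOk n log = true) →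
      ∃ evs, logs.mapM pvParseB? = some evs := by
  intro logs
  induction logs with
  | nil => intro _; exact ⟨[], rfl⟩
  | cons log rest ih =>
    intro h
    obtain ⟨idx, status, time, hp, _, _⟩ := logOk_parse (h log (by simp))
    obtain ⟨es, hes⟩ := ih (fun l hl => h l (by simp [hl]))
    refine ⟨(idx, status == "start", time) :: es, ?_⟩
    rw [List.mapM_cons, parseB_eq, hp, hes]
    rfl

-- total 'res[k] += v' at a Nat index (proof-side form of both updates under Pre_)
def addAt (res : List Int) (k : Nat) (v : Int) : List Int :=
  res.set k (res.getD k 0 + v)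

-- A's pending partial credits to the still-open frames: for the top frame the clock
-- boundary is prevTime, for each deeper frame it is the start time of the frame above it.
def extras (prev : Int) (frames : List (Int × Int × Int)) (res : List Int) : List Int :=
  match frames with
  | [] => res
  | (i, s, c) :: rest => addAt (extras s rest res) i.toNat (prev - s - c)

theorem length_addAt (res : List Int) (k : Nat) (v : Int) :
    (addAt res k v).length = res.length := by
  simp [addAt]

theorem addAt_zero (res : List Int) (k : Nat) (h : k < res.length) :
    addAt res k 0 = res := by
  simp [addAt, List.getD_eq_getElem?_getD, List.getElem?_eq_getElem h]

theorem addAt_addAt (res : List Int) (k : Nat) (v w : Int) (h : k < res.length) :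
    addAt (addAt res k v) k w = addAt res k (v + w) := by
  simp [addAt, List.getD_eq_getElem?_getD, List.getElem?_set_self',
    List.getElem?_eq_getElem h, List.set_set]
  ring_nf

theorem addAt_comm (res : List Int) (k₁ k₂ : Nat) (v w : Int)
    (h₁ : k₁ < res.length) (h₂ : k₂ < res.length) :
    addAt (addAt res k₁ v) k₂ w = addAt (addAt res k₂ w) k₁ v := by
  by_cases hk : k₁ = k₂
  · subst hk
    rw [addAt_addAt _ _ _ _ h₁, addAt_addAt _ _ _ _ h₁, Int.add_comm]
  · simp only [addAt, List.getD_eq_getElem?_getD, List.getElem?_set_ne hk,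
      List.getElem?_set_ne (Ne.symm hk)]
    exact List.set_comm _ _ hk

theorem length_extras (prev : Int) (frames : List (Int × Int × Int)) (res : List Int) :
    (extras prev frames res).length = res.length := by
  induction frames generalizing prev with
  | nil => rfl
  | cons f rest ih =>
    obtain ⟨i, s, c⟩ := f
    simp [extras, length_addAt, ih]

theorem extras_addAt (prev : Int) (frames : List (Int × Int × Int)) (res : List Int)
    (k : Nat) (v : Int) (hk : k < res.length)
    (hf : ∀ f ∈ frames, f.1.toNat < res.length) :
    extras prev frames (addAt res k v) = addAt (extras prev frames res) k v := by
  induction frames generalizing prev with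
  | nil => rfl
  | cons f rest ih =>
    obtain ⟨i, s, c⟩ := f
    have hi : i.toNat < res.length := hf (i, s, c) (by simp)
    rw [extras, extras, ih s (fun f hf' => hf f (by simp [hf'])),
      addAt_comm _ _ _ _ _ (by rw [length_extras]; exact hk) (by rw [length_extras]; exact hi)]

theorem pyAddAt?_eq (res : List Int) (i v : Int) (h0 : 0 ≤ i) (h1 : i.toNat < res.length) :
    pyAddAt? res i v = some (addAt res i.toNat v) := by
  unfold pyAddAt?
  rw [PySem.List.pyGet?_of_nonneg res h0]
  simp [PySem.List.pySet?, PySem.List.pyIdx?, addAt, List.getElem?_eq_getElem h1,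
    List.getD_eq_getElem?_getD]
  exact ⟨i.toNat, by rw [if_pos h0, if_pos (by omega)], rfl⟩

-- the main loop invariant: from related states, A's fold over the raw logs and B's
-- walk over the parsed events stay related
theorem loop_invariant (logs : List String) :
    ∀ (n prev : Int) (frames : List (Int × Int × Int)) (res : List Int)
      (evs : List (Int × Bool × Int)),
    logs.mapM pvParseB? = some evs →
    (∀ log ∈ logs, logOk n log = true) →
    (∀ f ∈ frames, 0 ≤ f.1 ∧ f.1 < n) →
    ((n.toNat : Nat) = res.length) →
    (∀ k ≤ logs.length,
      (logs.take k).countP (fun l => !isStartLog l) ≤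
        (logs.take k).countP isStartLog + frames.length) →
    ∃ (prev' : Int) (frames' : List (Int × Int × Int)) (res' : List Int),
      logs.foldl stepA (some (prev, frames.map (·.1), extras prev frames res)) =
        some (prev', frames'.map (·.1), extras prev' frames' res') ∧
      runB frames res evs = res' ∧
      res'.length = res.length ∧
      (∀ f ∈ frames', 0 ≤ f.1 ∧ f.1 < n) ∧
      frames'.length + logs.countP (fun l => !isStartLog l) =
        frames.length + logs.countP isStartLog := by
  induction logs with
  | nil =>
    intro n prev frames res evs hmap _ hfr _ _
    have hevs : evs = [] := by simpa using hmap.symm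
    subst hevs
    exact ⟨prev, frames, res, rfl, rfl, rfl, hfr, rfl⟩
  | cons log rest ih =>
    intro n prev frames res evs hmap hok hfr hlen hbal
    have hframesIdx : ∀ f ∈ frames, f.1.toNat < res.length := by
      intro f hf
      have := hfr f hf
      omega
    obtain ⟨idx, status, time, hp, hidx0, hidxn⟩ := logOk_parse (hok log (by simp))
    have hpB : pvParseB? log = some (idx, status == "start", time) := by
      rw [parseB_eq, hp]; rfl
    rw [List.mapM_cons, hpB] at hmap
    rcases hrest : rest.mapM pvParseB? with _ | es
    · rw [hrest] at hmap; simp at hmap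
    · rw [hrest] at hmap
      have hevs : evs = (idx, status == "start", time) :: es := by simpa using hmap.symm
      subst hevs
      have hidxlt : idx.toNat < res.length := by omega
      by_cases hs : status = "start"
      · -- 'start' log
        have hsb : (status == "start") = true := by simp [hs]
        have hstart : isStartLog log = true := by unfold isStartLog; rw [hp]; simp [hs]
        -- A's step
        have e2 : time - time - 0 = 0 := by ring
        have hA : stepA (some (prev, frames.map (·.1), extras prev frames res)) log =
            some (time, idx :: frames.map (·.1), extras time ((idx, time, 0) :: frames) res) := by
          cases frames with
          | nil =>
            simp only [stepA, hp, Option.bind_some, hs, List.map_nil, extras]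
            rw [if_pos (by decide), e2, addAt_zero _ _ hidxlt]
          | cons f rest' =>
            obtain ⟨i, s, c⟩ := f
            have hi0 : 0 ≤ i := (hfr (i, s, c) (by simp)).1
            have hilt : i.toNat < res.length := hframesIdx (i, s, c) (by simp)
            have hilt' : i.toNat < (extras s rest' res).length := by
              rw [length_extras]; exact hilt
            have e1 : prev - s - c + (time - prev) = time - s - c := by ring
            simp only [stepA, hp, Option.bind_some, hs, List.map_cons, extras]
            try dsimp only
            rw [if_pos (by decide),
              pyAddAt?_eq _ _ _ hi0 (by simp [length_addAt, length_extras, hilt]),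
              addAt_addAt _ _ _ _ hilt', e1, e2,
              addAt_zero _ _ (by simp [length_addAt, length_extras, hidxlt])]
            rfl
        -- apply the IH
        obtain ⟨prev', frames', res', hA', hB', hlen', hfr', hcnt'⟩ :=
          ih n time ((idx, time, 0) :: frames) res es hrest
            (fun l hl => hok l (by simp [hl]))
            (by intro f hf
                simp only [List.mem_cons] at hf
                rcases hf with rfl | hf
                · exact ⟨hidx0, hidxn⟩
                · exact hfr f hf)
            hlen
            (by intro k hk
                have := hbal (k + 1) (by simpa using hk)
                simp [List.take_succ_cons, hstart] at this ⊢; omega)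
        refine ⟨prev', frames', res', ?_, ?_, hlen', hfr', ?_⟩
        · rw [List.foldl_cons, hA]; exact hA'
        · rw [hsb]; exact hB'
        · simp [hstart] at hcnt' ⊢; omega
      · -- 'end' log (any status other than "start")
        have hsb : (status == "start") = false := by simp [hs]
        have hstart : isStartLog log = false := by
          unfold isStartLog; rw [hp]; simpa using hs
        -- the prefix balance at k = 1 forces a non-empty stack
        have hne : frames ≠ [] := by
          intro h
          have h1 := hbal 1 (by simp)
          simp [List.take_succ_cons, hstart, h] at h1
        obtain ⟨⟨i, s, c⟩, rest', rfl⟩ : ∃ f rest', frames = f :: rest' := by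
          cases frames with
          | nil => exact absurd rfl hne
          | cons f r => exact ⟨f, r, rfl⟩
        have hi0 : 0 ≤ i := (hfr (i, s, c) (by simp)).1
        have hin : i < n := (hfr (i, s, c) (by simp)).2
        have hilt : i.toNat < res.length := hframesIdx (i, s, c) (by simp)
        have hilt' : i.toNat < (extras s rest' res).length := by
          rw [length_extras]; exact hilt
        cases rest' with
        | nil =>
          have hBstep : runB [(i, s, c)] res ((idx, status == "start", time) :: es) =
              runB [] (addAt res i.toNat (time - s + 1 - c)) es := by
            rw [hsb]; rfl
          -- the popped frame was the only one
          have e3 : prev - s - c + (time - prev + 1) = time - s + 1 - c := by ring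
          have hA : stepA (some (prev, [(i, s, c)].map (·.1), extras prev [(i, s, c)] res)) log =
              some (time + 1, ([] : List (Int × Int × Int)).map (·.1),
                extras (time + 1) [] (addAt res i.toNat (time - s + 1 - c))) := by
            simp only [stepA, hp, Option.bind_some, List.map_cons, List.map_nil, extras]
            try dsimp only
            rw [if_neg (by simp [hs]),
              pyAddAt?_eq _ _ _ hi0 (by simp [length_addAt, hilt]),
              addAt_addAt _ _ _ _ hilt, e3]
            rfl
          obtain ⟨prev', frames', res', hA', hB', hlen', hfr', hcnt'⟩ :=
            ih n (time + 1) [] (addAt res i.toNat (time - s + 1 - c)) es hrest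
              (fun l hl => hok l (by simp [hl]))
              (by simp)
              (by rw [length_addAt]; exact hlen)
              (by intro k hk
                  have h1 := hbal (k + 1) (by simpa using hk)
                  simp [List.take_succ_cons, hstart] at h1 ⊢; omega)
          refine ⟨prev', frames', res', ?_, ?_, ?_, hfr', ?_⟩
          · rw [List.foldl_cons, hA]; exact hA'
          · rw [hBstep]; exact hB'
          · rw [hlen', length_addAt]
          · simp [hstart] at hcnt' ⊢; omega
        | cons g r =>
          -- the frame below the popped one absorbs the duration as child time
          obtain ⟨j, sj, cj⟩ := g
          have hBstep : runB ((i, s, c) :: (j, sj, cj) :: r) res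
                ((idx, status == "start", time) :: es) =
              runB ((j, sj, cj + (time - s + 1)) :: r)
                (addAt res i.toNat (time - s + 1 - c)) es := by
            rw [hsb]; rfl
          have hj0 : 0 ≤ j := (hfr (j, sj, cj) (by simp)).1
          have hjn : j < n := (hfr (j, sj, cj) (by simp)).2
          have hjlt : j.toNat < res.length := hframesIdx (j, sj, cj) (by simp)
          have e3 : prev - s - c + (time - prev + 1) = time - s + 1 - c := by ring
          have e4 : time + 1 - sj - (cj + (time - s + 1)) = s - sj - cj := by ring
          have hA : stepA (some (prev, ((i, s, c) :: (j, sj, cj) :: r).map (·.1),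
                extras prev ((i, s, c) :: (j, sj, cj) :: r) res)) log =
              some (time + 1, ((j, sj, cj + (time - s + 1)) :: r).map (·.1),
                extras (time + 1) ((j, sj, cj + (time - s + 1)) :: r)
                  (addAt res i.toNat (time - s + 1 - c))) := by
            simp only [stepA, hp, Option.bind_some, List.map_cons, extras]
            try dsimp only
            rw [if_neg (by simp [hs]),
              pyAddAt?_eq _ _ _ hi0 (by simp [length_addAt, length_extras, hilt]),
              addAt_addAt _ _ _ _ (by simp [length_addAt, length_extras, hilt]), e3, e4,
              extras_addAt sj r res i.toNat (time - s + 1 - c) hilt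
                (fun f hf => hframesIdx f (by simp [hf])),
              addAt_comm _ _ _ _ _ (by simp [length_extras, hjlt])
                (by simp [length_extras, hilt])]
            rfl
          obtain ⟨prev', frames', res', hA', hB', hlen', hfr', hcnt'⟩ :=
            ih n (time + 1) ((j, sj, cj + (time - s + 1)) :: r)
              (addAt res i.toNat (time - s + 1 - c)) es hrest
              (fun l hl => hok l (by simp [hl]))
              (by intro f hf
                  simp only [List.mem_cons] at hf
                  rcases hf with rfl | hf
                  · exact ⟨hj0, hjn⟩
                  · exact hfr f (by simp [hf]))
              (by rw [length_addAt]; exact hlen)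
              (by intro k hk
                  have h1 := hbal (k + 1) (by simpa using hk)
                  simp [List.take_succ_cons, hstart] at h1 ⊢; omega)
          refine ⟨prev', frames', res', ?_, ?_, ?_, hfr', ?_⟩
          · rw [List.foldl_cons, hA]; exact hA'
          · rw [hBstep]; exact hB'
          · rw [hlen', length_addAt]
          · simp [hstart] at hcnt' ⊢; omega

-- ===== VERDICT (by name: the statement is the Claim_ definition above) =====
theorem exclusiveTime_spec : Claim_equal_exclusiveTime := by
  intro n logs _ hpre
  obtain ⟨hok, hbal, hcnt⟩ := hpre
  unfold Spec_exclusiveTime exclusiveTime exclusiveTime_alt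
  obtain ⟨evs, hmap⟩ := mapM_parseB_some n logs hok
  obtain ⟨prev', frames', res', hA, hB, _, _, hcnt'⟩ :=
    loop_invariant logs n 0 [] (List.replicate n.toNat 0) evs hmap hok (by simp)
      (by simp) (by simpa using hbal)
  have hempty : frames' = [] := by
    simp [hcnt] at hcnt'
    exact hcnt'
  subst hempty
  simp only [List.map_nil] at hA
  rw [show extras 0 [] (List.replicate n.toNat 0) = List.replicate n.toNat 0 from rfl] at hA
  rw [hmap, hA]
  show extras prev' [] res' = runB [] (List.replicate n.toNat 0) evs
  rw [hB]
  rfl
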